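-- pv_equiv track=rewrite | github.com/jason-chao/appcestry | AppcestryCore/merge_smali.py | getCleanNamespace
-- ===== SOURCE A (Python) =====
-- def getCleanNamespace(namespace):
--     """Clean the namespace that is inferred from a directory structure.
--        Args:
--          namesapce: the namespace
--        Returns:
--          Clean namespace
--     """
--     nslevels = namespace.split(".")
--     finalLevel = len(nslevels)
--     for i in range(len(nslevels) - 1, -1, -1):
--         if len(nslevels[i]) > 1:
--             finalLevel = i
--             break
--     return ".".join(nslevels[:(finalLevel + 1)])
-- ===== SOURCE B (Python) =====
-- def getCleanNamespace(namespace):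
--     """Clean the namespace that is inferred from a directory structure.
--        Args:
--          namesapce: the namespace
--        Returns:
--          Clean namespace
--     """
--     run = 0    # length of the current run of non-dot characters
--     pos = 0    # number of characters consumed so far
--     cut = None # end position of the last component longer than one character
--     for ch in namespace:
--         pos += 1
--         if ch == '.':
--             run = 0
--         else:
--             run += 1
--             if run > 1:
--                 cut = pos
--     return namespace if cut is None else namespace[:cut]
-- ===== Notes on version B (the rewrite author's own statement) =====
-- stated objective: alternative
-- what changed: Replaces A's split-on-dot / reverse index loop / join pipeline by a single character-level scan that tracks a run-length of non-dot characters and records the end position of the last component longer than one character, finishing with one string slice (no split, no join, no index list).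
import Mathlib
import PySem

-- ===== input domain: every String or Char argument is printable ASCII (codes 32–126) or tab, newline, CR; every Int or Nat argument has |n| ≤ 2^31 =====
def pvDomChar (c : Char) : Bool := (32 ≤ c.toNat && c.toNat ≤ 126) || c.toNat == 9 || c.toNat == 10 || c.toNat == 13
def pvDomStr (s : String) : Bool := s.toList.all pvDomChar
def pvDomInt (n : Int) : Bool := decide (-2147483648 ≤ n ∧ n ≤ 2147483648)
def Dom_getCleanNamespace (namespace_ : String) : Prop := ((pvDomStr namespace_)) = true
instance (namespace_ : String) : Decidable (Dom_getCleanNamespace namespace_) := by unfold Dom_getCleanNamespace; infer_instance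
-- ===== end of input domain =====

-- B replaces A's split / reverse index loop / join pipeline by a single character-level
-- scan with a run-length counter that records the end position of the last component
-- longer than one character, followed by one string slice (objective: alternative algorithm).

-- ===== PORT A =====
-- the 'for i in range(len(nslevels)-1, -1, -1): if len(nslevels[i]) > 1: finalLevel = i; break' loop
-- (pyGetD is exact here: every index produced by the range is in bounds)
def getCleanNamespaceLoop (ns : List String) : List Int → Int
  | [] => PySem.List.len ns
  | i :: rest =>
    if 1 < PySem.Str.len (PySem.List.pyGetD ns i "") then i
    else getCleanNamespaceLoop ns rest

def getCleanNamespace (namespace_ : String) : String :=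
  let nslevels := (PySem.Str.split? namespace_ ".").getD []
  let finalLevel :=
    getCleanNamespaceLoop nslevels (PySem.List.pyRange (PySem.List.len nslevels - 1) (-1) (-1))
  PySem.Str.join "." (PySem.List.slice nslevels none (some (finalLevel + 1)))

-- ===== PORT B =====
-- B's loop body: state = (pos, run, cut); 'pos += 1; if ch == ".": run = 0
-- else: run += 1; if run > 1: cut = pos'
def getCleanNamespaceStep (st : Int × Int × Option Int) (ch : Char) : Int × Int × Option Int :=
  let pos := st.1 + 1
  if ch == '.' then (pos, 0, st.2.2)
  else
    let run := st.2.1 + 1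
    (pos, run, if 1 < run then some pos else st.2.2)

def getCleanNamespace_alt (namespace_ : String) : String :=
  let st := namespace_.toList.foldl getCleanNamespaceStep (0, 0, none)
  match st.2.2 with
  | none => namespace_
  | some c => PySem.Str.slice namespace_ none (some c)

-- ===== PRECONDITION & SPEC =====
def Spec_getCleanNamespace (namespace_ : String) (out : String) : Prop := out = getCleanNamespace_alt namespace_
instance (namespace_ : String) (out : String) : Decidable (Spec_getCleanNamespace namespace_ out) := by unfold Spec_getCleanNamespace; infer_instance

-- ===== CLAIM (what is proved, stated in full; the proofs are below) =====
def Claim_equal_getCleanNamespace : Prop := ∀ (namespace_ : String), Dom_getCleanNamespace namespace_ → Spec_getCleanNamespace namespace_ (getCleanNamespace namespace_)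

-- ===== LEMMAS AND PROOFS =====

-- drop the trailing elements whose measure is ≤ 1 (shared shape of "the loop stopped at
-- the last long component": A uses it on the split parts, B on the raw characters)
def trimRev {α : Type} (f : α → Nat) (l : List α) : List α :=
  (l.reverse.dropWhile (fun x => f x ≤ 1)).reverse

lemma trimRev_append {α : Type} (f : α → Nat) (l : List α) (x : α) :
    trimRev f (l ++ [x]) = if 1 < f x then l ++ [x] else trimRev f l := by
  unfold trimRev
  rw [List.reverse_append, List.reverse_singleton, List.singleton_append, List.dropWhile_cons]
  by_cases h : 1 < f x
  · rw [if_neg (by simp; omega), if_pos h]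
    simp
  · rw [if_pos (by simp; omega), if_neg h]

lemma trimRev_prefix {α : Type} (f : α → Nat) (l : List α) : trimRev f l <+: l := by
  have h := List.dropWhile_suffix (l := l.reverse) (fun x => f x ≤ 1)
  unfold trimRev
  have h2 := List.reverse_suffix (l₁ := (l.reverse.dropWhile (fun x => f x ≤ 1)).reverse) (l₂ := l)
  rw [List.reverse_reverse] at h2
  exact h2.mp h

lemma trimRev_map {α β : Type} (f : β → Nat) (g : α → β) (l : List α) :
    trimRev f (l.map g) = (trimRev (fun x => f (g x)) l).map g := by
  unfold trimRev
  rw [← List.map_reverse, List.dropWhile_map, ← List.map_reverse]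
  rfl

-- ---- A reduced to trimRev on the split parts ----

lemma find?_congr' {α : Type} (l : List α) (p q : α → Bool) (h : ∀ a ∈ l, p a = q a) :
    l.find? p = l.find? q := by
  induction l with
  | nil => rfl
  | cons a l ih =>
    simp only [List.find?_cons, h a (List.mem_cons_self)]
    cases hq : q a
    · exact ih (fun b hb => h b (List.mem_cons_of_mem _ hb))
    · rfl

def trimS (ns : List String) : List String := trimRev (fun x => x.length) ns

lemma find_desc_trim (ns : List String) :
    (PySem.List.pyRange ((PySem.List.len ns) - 1) (-1) (-1)).find?
        (fun i => decide (1 < PySem.Str.len (PySem.List.pyGetD ns i ""))) =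
      (if trimS ns = [] then none else some ((trimS ns).length - 1 : Int)) := by
  induction ns using List.reverseRecOn with
  | nil =>
    rw [show PySem.List.len ([] : List String) - 1 = (-1 : Int) by simp [PySem.List.len_eq]]
    rw [PySem.List.pyRange_neg_one_eq_nil le_rfl]
    rfl
  | append_singleton ns x ih =>
    have hlen : PySem.List.len (ns ++ [x]) - 1 = (ns.length : Int) := by
      simp [PySem.List.len_eq]
    rw [hlen, PySem.List.pyRange_neg_one_cons (by omega), List.find?_cons]
    have hx : PySem.List.pyGetD (ns ++ [x]) (ns.length : Int) "" = x := by
      rw [PySem.List.pyGetD_natCast]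
      simp [List.getD]
    have hrest : (PySem.List.pyRange ((ns.length : Int) - 1) (-1) (-1)).find?
        (fun i => decide (1 < PySem.Str.len (PySem.List.pyGetD (ns ++ [x]) i ""))) =
        (PySem.List.pyRange ((ns.length : Int) - 1) (-1) (-1)).find?
        (fun i => decide (1 < PySem.Str.len (PySem.List.pyGetD ns i ""))) := by
      apply find?_congr'
      intro i hi
      rw [PySem.List.pyRange_neg_one] at hi
      obtain ⟨k, hk, rfl⟩ := List.mem_map.mp hi
      rw [List.mem_range] at hk
      have h1 : (0:Int) ≤ (ns.length : Int) - 1 - k := by omega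
      rw [PySem.List.pyGetD_eq_getElem _ _ h1 (by simp; omega),
          PySem.List.pyGetD_eq_getElem _ _ h1 (by omega)]
      congr 1
      rw [List.getElem_append_left]
    have htrim : trimS (ns ++ [x]) = if 1 < x.length then ns ++ [x] else trimS ns :=
      trimRev_append _ ns x
    by_cases hP : 1 < x.length
    · rw [htrim, if_pos hP]
      have hd : decide (1 < PySem.Str.len (PySem.List.pyGetD (ns ++ [x]) ((ns.length : Nat) : Int) "")) = true := by
        simp only [hx]; simp [PySem.Str.len_eq, hP]
      rw [hd]
      dsimp only
      rw [if_neg (by simp)]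
      simp
    · have hd : decide (1 < PySem.Str.len (PySem.List.pyGetD (ns ++ [x]) ((ns.length : Nat) : Int) "")) = false := by
        simp only [hx]; simp [PySem.Str.len_eq]; omega
      rw [hd]
      dsimp only
      rw [PySem.List.len_eq] at ih
      rw [hrest, ih, htrim, if_neg hP]

lemma A_reduced (namespace_ : String) :
    getCleanNamespace namespace_ =
      (let ns := (PySem.Str.split? namespace_ ".").getD []
       PySem.Str.join "." (if trimS ns = [] then ns else trimS ns)) := by
  unfold getCleanNamespace
  dsimp only
  set ns := (PySem.Str.split? namespace_ ".").getD [] with hns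
  have hloop : ∀ idxs, getCleanNamespaceLoop ns idxs =
      (idxs.find? (fun i => decide (1 < PySem.Str.len (PySem.List.pyGetD ns i "")))).getD
        (PySem.List.len ns) := by
    intro idxs
    induction idxs with
    | nil => rfl
    | cons i rest ih =>
      by_cases h : 1 < (PySem.List.pyGetD ns i "").length
      · simp [getCleanNamespaceLoop, PySem.Str.len_eq, h]
      · simp [getCleanNamespaceLoop, PySem.Str.len_eq, h, ih]
  rw [hloop, find_desc_trim]
  by_cases ht : trimS ns = []
  · rw [if_pos ht, if_pos ht]
    simp only [Option.getD_none]
    congr 1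
    rw [PySem.List.len_eq, PySem.List.slice_to _ (by positivity)]
    rw [show ((ns.length : Int) + 1).toNat = ns.length + 1 by omega]
    exact List.take_of_length_le (by omega)
  · rw [if_neg ht, if_neg ht]
    simp only [Option.getD_some]
    congr 1
    rw [show ((trimS ns).length - 1 + 1 : Int) = ((trimS ns).length : Int) by ring]
    rw [PySem.List.slice_to_natCast]
    exact ((List.prefix_iff_eq_take).mp (trimRev_prefix _ ns)).symm

-- ---- the split bridge: PySem's fuel-based splitOn on the one-character separator "."
--      is Mathlib's List.splitOnP ----

lemma go_nil (fuel : Nat) (cur : List Char) (acc : List (List Char)) :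
    PySem.Chars.splitOn.go ['.'] (fuel+1) [] cur acc = (cur.reverse :: acc).reverse := by
  rw [PySem.Chars.splitOn.go]
  omega

lemma go_dot (fuel : Nat) (rest cur : List Char) (acc : List (List Char)) :
    PySem.Chars.splitOn.go ['.'] (fuel+1) ('.' :: rest) cur acc =
      PySem.Chars.splitOn.go ['.'] fuel rest [] (cur.reverse :: acc) := by
  rw [PySem.Chars.splitOn.go]
  simp [List.isPrefixOf]

lemma go_nondot (fuel : Nat) (c : Char) (h : c ≠ '.') (rest cur : List Char) (acc : List (List Char)) :
    PySem.Chars.splitOn.go ['.'] (fuel+1) (c :: rest) cur acc =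
      PySem.Chars.splitOn.go ['.'] fuel rest (c :: cur) acc := by
  rw [PySem.Chars.splitOn.go]
  simp only [List.isPrefixOf, Bool.and_true]
  simp [Ne.symm h]

lemma go_spec (fuel : Nat) : ∀ (l : List Char), l.length < fuel →
    ∀ (cur : List Char) (acc : List (List Char)),
    PySem.Chars.splitOn.go ['.'] fuel l cur acc =
      acc.reverse ++ (l.splitOnP (· == '.')).modifyHead (cur.reverse ++ ·) := by
  induction fuel with
  | zero => intro l hl; omega
  | succ fuel ih =>
    intro l hl cur acc
    cases l with
    | nil =>
      rw [go_nil]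
      simp [List.splitOnP_nil]
    | cons c rest =>
      by_cases hc : c = '.'
      · subst hc
        rw [go_dot, ih rest (by simpa using hl) [] (cur.reverse :: acc)]
        simp only [List.splitOnP_cons, List.reverse_cons]
        simp only [show (fun x => x == '.') '.' = true by simp, if_true]
        cases hrs : rest.splitOnP (· == '.') <;> simp
      · rw [go_nondot fuel c hc, ih rest (by simp at hl; omega) (c :: cur) acc]
        rw [List.splitOnP_cons, if_neg (by simp [hc])]
        obtain ⟨h', t', ht'⟩ : ∃ h' t', rest.splitOnP (· == '.') = h' :: t' := by
          cases hrs : rest.splitOnP (· == '.') with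
          | nil => exact absurd hrs (List.splitOnP_ne_nil _ _)
          | cons a b => exact ⟨a, b, rfl⟩
        rw [ht']
        simp

lemma splitOn_eq (cs : List Char) :
    PySem.Chars.splitOn cs ['.'] = cs.splitOnP (· == '.') := by
  unfold PySem.Chars.splitOn
  rw [go_spec (cs.length + 1) cs (by omega) [] []]
  obtain ⟨h', t', ht'⟩ : ∃ h' t', cs.splitOnP (· == '.') = h' :: t' := by
    cases hrs : cs.splitOnP (· == '.') with
    | nil => exact absurd hrs (List.splitOnP_ne_nil _ _)
    | cons a b => exact ⟨a, b, rfl⟩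
  rw [ht']
  simp

lemma splitOnP_dotfree (cs : List Char) : ∀ q ∈ cs.splitOnP (· == '.'), '.' ∉ q := by
  induction cs with
  | nil => simp [List.splitOnP_nil]
  | cons c rest ih =>
    rw [List.splitOnP_cons]
    by_cases hc : c = '.'
    · subst hc
      rw [if_pos (by simp)]
      intro q hq
      rcases List.mem_cons.mp hq with h | h
      · subst h; simp
      · exact ih q h
    · rw [if_neg (by simp [hc])]
      obtain ⟨h', t', ht'⟩ : ∃ h' t', rest.splitOnP (· == '.') = h' :: t' := by
        cases hrs : rest.splitOnP (· == '.') with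
        | nil => exact absurd hrs (List.splitOnP_ne_nil _ _)
        | cons a b => exact ⟨a, b, rfl⟩
      rw [ht']
      intro q hq
      rcases List.mem_cons.mp hq with h | h
      · subst h
        intro hm
        rcases List.mem_cons.mp hm with h2 | h2
        · exact hc h2.symm
        · exact ih h' (ht' ▸ List.mem_cons_self) h2
      · exact ih q (ht' ▸ List.mem_cons_of_mem _ h)

lemma split_glue (s : String) :
    ((PySem.Str.split? s ".").getD []).map String.toList = s.toList.splitOnP (· == '.') := by
  have h := PySem.Str.split?_map s "."
  rw [show (".":String).toList = ['.'] by decide] at h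
  rw [show PySem.Chars.split? s.toList ['.'] = some (PySem.Chars.splitOn s.toList ['.']) by
    simp [PySem.Chars.split?]] at h
  obtain ⟨y, hy, hfy⟩ := Option.map_eq_some_iff.mp h
  rw [hy, Option.getD_some, hfy, splitOn_eq]

-- ---- B's character scan computed on '.'-intercalated parts ----

def cutSpec : List (List Char) → Int → Option Int → Option Int
  | [], _, cut => cut
  | p :: rest, pos, cut =>
      cutSpec rest (pos + (p.length : Int) + 1)
        (if 1 < (p.length : Int) then some (pos + (p.length : Int)) else cut)

lemma foldl_seg : ∀ (p : List Char), '.' ∉ p → ∀ (pos run : Int) (cut : Option Int),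
    p.foldl getCleanNamespaceStep (pos, run, cut) =
      (pos + (p.length : Int), run + (p.length : Int),
       if 1 < run + (p.length : Int) ∧ 1 ≤ (p.length : Int) then some (pos + (p.length : Int)) else cut) := by
  intro p
  induction p with
  | nil => intro _ pos run cut; simp
  | cons a t ih =>
    intro h pos run cut
    have ha : a ≠ '.' := fun hh => h (hh ▸ List.mem_cons_self)
    rw [List.foldl_cons]
    rw [show getCleanNamespaceStep (pos, run, cut) a =
        (pos + 1, run + 1, if 1 < run + 1 then some (pos + 1) else cut) by
      simp [getCleanNamespaceStep, ha]]
    rw [ih (fun hm => h (List.mem_cons_of_mem _ hm))]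
    rw [show (((a :: t).length : Nat) : Int) = (t.length : Int) + 1 by push_cast [List.length_cons]; ring]
    refine Prod.ext (by ring_nf) (Prod.ext (by simp; ring_nf) ?_)
    simp only
    split_ifs <;> first | rfl | (exfalso; omega) | (congr 1; omega)

lemma step_dot (pos run : Int) (cut : Option Int) :
    getCleanNamespaceStep (pos, run, cut) '.' = (pos + 1, 0, cut) := by
  simp [getCleanNamespaceStep]

lemma foldl_inter_cut : ∀ (parts : List (List Char)), (∀ q ∈ parts, '.' ∉ q) →
    ∀ (pos : Int) (cut : Option Int),
    (([ '.' ].intercalate parts).foldl getCleanNamespaceStep (pos, 0, cut)).2.2 =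
      cutSpec parts pos cut := by
  intro parts
  induction parts with
  | nil => intro h pos cut; simp [List.intercalate, cutSpec]
  | cons p rest ih =>
    intro h pos cut
    have hp : '.' ∉ p := h p List.mem_cons_self
    cases rest with
    | nil =>
      rw [show ['.'].intercalate [p] = p by simp [List.intercalate]]
      rw [foldl_seg p hp]
      simp only [cutSpec]
      split_ifs <;> first | rfl | (exfalso; omega)
    | cons r rs =>
      rw [show ['.'].intercalate (p :: r :: rs) = p ++ '.' :: ['.'].intercalate (r :: rs) by
        simp [List.intercalate, List.intersperse]]
      rw [List.foldl_append, foldl_seg p hp, List.foldl_cons, step_dot]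
      rw [ih (fun q hq => h q (List.mem_cons_of_mem _ hq))]
      simp only [cutSpec]
      congr 1
      split_ifs <;> first | rfl | (exfalso; omega)

lemma inter_len_cons (q : List Char) (l : List (List Char)) (hl : l ≠ []) :
    ['.'].intercalate (q :: l) = q ++ '.' :: ['.'].intercalate l := by
  cases l with
  | nil => exact absurd rfl hl
  | cons a b => simp [List.intercalate, List.intersperse]

lemma cutSpec_append (p : List Char) : ∀ (ps : List (List Char)) (pos : Int) (cut : Option Int),
    cutSpec (ps ++ [p]) pos cut =
      if 1 < (p.length : Int) then some (pos + ((['.'].intercalate (ps ++ [p])).length : Int))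
      else cutSpec ps pos cut := by
  intro ps
  induction ps with
  | nil =>
    intro pos cut
    simp only [List.nil_append, cutSpec]
    rw [show ['.'].intercalate [p] = p by simp [List.intercalate]]
  | cons q ps ih =>
    intro pos cut
    simp only [List.cons_append, cutSpec]
    rw [ih]
    rw [inter_len_cons q (ps ++ [p]) (by simp)]
    split_ifs <;> first | rfl | (congr 1; push_cast [List.length_append, List.length_cons]; ring)

lemma cutSpec_trim (parts : List (List Char)) (pos : Int) :
    cutSpec parts pos none =
      if trimRev List.length parts = [] then none
      else some (pos + ((['.'].intercalate (trimRev List.length parts)).length : Int)) := by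
  induction parts using List.reverseRecOn with
  | nil => simp [cutSpec, trimRev]
  | append_singleton ps p ih =>
    rw [cutSpec_append, trimRev_append]
    by_cases h : 1 < p.length
    · rw [if_pos (by exact_mod_cast h), if_pos h, if_neg (by simp)]
    · rw [if_neg (by exact_mod_cast h), if_neg h, ih]

-- ---- intercalate of a prefix is a prefix ----

lemma inter_cons_flat (q : List Char) : ∀ (t : List (List Char)),
    ['.'].intercalate (q :: t) = q ++ t.flatMap (fun x => '.' :: x) := by
  intro t
  induction t generalizing q with
  | nil => simp [List.intercalate]
  | cons a b ih =>
    rw [inter_len_cons q (a :: b) (by simp), ih a]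
    simp

lemma inter_prefix (T P : List (List Char)) (hne : T ≠ []) (hTP : T <+: P) :
    ['.'].intercalate T <+: ['.'].intercalate P := by
  obtain ⟨t, rfl⟩ := hTP
  cases T with
  | nil => exact absurd rfl hne
  | cons q T' =>
    rw [List.cons_append, inter_cons_flat q (T' ++ t), inter_cons_flat q T', List.flatMap_append]
    exact ⟨t.flatMap (fun x => '.' :: x), by simp⟩

-- ===== VERDICT (by name: the statement is the Claim_ definition above) =====
theorem getCleanNamespace_spec : Claim_equal_getCleanNamespace := by
  intro s _
  unfold Spec_getCleanNamespace
  rw [A_reduced]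
  dsimp only
  set ns := (PySem.Str.split? s ".").getD [] with hns
  have hmap : ns.map String.toList = s.toList.splitOnP (· == '.') := split_glue s
  have hdotfree : ∀ q ∈ ns.map String.toList, '.' ∉ q := by
    rw [hmap]; exact splitOnP_dotfree s.toList
  have hjoin : ['.'].intercalate (ns.map String.toList) = s.toList := by
    rw [hmap]
    exact List.intercalate_splitOn s.toList '.'
  have htm : trimRev List.length (ns.map String.toList) = (trimS ns).map String.toList := by
    rw [trimRev_map]
    unfold trimS
    rw [show (fun x : String => x.toList.length) = (fun x : String => x.length) from
      funext (fun x => by simp)]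
  have hfold : (s.toList.foldl getCleanNamespaceStep (0,0,none)).2.2 =
      (if trimS ns = [] then none
       else some (((['.'].intercalate ((trimS ns).map String.toList)).length : Int))) := by
    conv_lhs => rw [← hjoin]
    rw [foldl_inter_cut _ hdotfree 0 none, cutSpec_trim, htm]
    by_cases ht : trimS ns = []
    · rw [if_pos (by rw [ht]; simp), if_pos ht]
    · rw [if_neg (by simpa using ht), if_neg ht, zero_add]
  unfold getCleanNamespace_alt
  dsimp only
  by_cases ht : trimS ns = []
  · rw [if_pos ht] at hfold
    rw [hfold, if_pos ht]
    apply String.toList_inj.mp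
    rw [PySem.Str.toList_join, show (".":String).toList = ['.'] by decide,
        show PySem.Chars.join ['.'] (ns.map String.toList) =
          ['.'].intercalate (ns.map String.toList) from rfl]
    exact hjoin
  · rw [if_neg ht] at hfold
    rw [hfold, if_neg ht]
    apply String.toList_inj.mp
    rw [PySem.Str.toList_join, show (".":String).toList = ['.'] by decide,
        PySem.Str.toList_slice]
    rw [show PySem.Chars.slice s.toList none
          (some ((['.'].intercalate ((trimS ns).map String.toList)).length : Int)) =
        PySem.List.slice s.toList none
          (some ((['.'].intercalate ((trimS ns).map String.toList)).length : Int)) from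
      PySem.Chars.slice_eq_listSlice _ _ _]
    rw [PySem.List.slice_to_natCast,
        show PySem.Chars.join ['.'] ((trimS ns).map String.toList) =
          ['.'].intercalate ((trimS ns).map String.toList) from rfl]
    have hpre : ['.'].intercalate ((trimS ns).map String.toList) <+: s.toList := by
      rw [← hjoin]
      exact inter_prefix _ _ (by simpa using ht) ((trimRev_prefix _ ns).map String.toList)
    exact (List.prefix_iff_eq_take).mp hpre
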